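-- pv_equiv track=rewrite | github.com/zigzagmonty6/KS4LATIN | y11/marking.py | _is_tense_swap
-- ===== SOURCE A (Python) =====
-- def _is_tense_swap(pupil_word, target_word):
--     """Detect if two words are the same verb but in different tenses (past vs present 3rd sg)."""
--     if pupil_word == target_word or len(pupil_word) < 4 or len(target_word) < 4:
--         return False
--     # Find the longest common prefix before the words diverge
--     common = 0
--     for a, b in zip(pupil_word, target_word):
--         if a == b: common += 1
--         else: break
--     if common < 3:
--         return False
--     p_suf = pupil_word[common:]
--     t_suf = target_word[common:]
--     past_suffs  = {'d', 'ed', 'ied'}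
--     pres_suffs  = {'s', 'es', 'ies'}
--     return ((p_suf in past_suffs and t_suf in pres_suffs) or
--             (p_suf in pres_suffs and t_suf in past_suffs))
-- ===== SOURCE B (Python) =====
-- _RULES = [
--     ('d', 's'), ('d', 'es'), ('d', 'ies'),
--     ('ed', 's'), ('ed', 'es'), ('ed', 'ies'),
--     ('ied', 's'), ('ied', 'es'), ('ied', 'ies'),
-- ]
--
-- def _is_tense_swap(pupil_word, target_word):
--     """Detect if two words are the same verb but in different tenses (past vs present 3rd sg)."""
--     for past, pres in _RULES:
--         for w1, w2 in ((pupil_word, target_word), (target_word, pupil_word)):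
--             if w1.endswith(past) and w2.endswith(pres):
--                 stem1 = w1[:len(w1) - len(past)]
--                 stem2 = w2[:len(w2) - len(pres)]
--                 if len(stem1) >= 3 and stem1 == stem2:
--                     return True
--     return False
-- ===== Notes on version B (the rewrite author's own statement) =====
-- stated objective: alternative
-- what changed: Replaced the longest-common-prefix scan plus suffix-set membership with direct enumeration of the nine fixed (past,pres) suffix-rewrite rules, checking endswith on both orderings and equality of the stripped stems (length >= 3); no running prefix counter is maintained.
import Mathlib
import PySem

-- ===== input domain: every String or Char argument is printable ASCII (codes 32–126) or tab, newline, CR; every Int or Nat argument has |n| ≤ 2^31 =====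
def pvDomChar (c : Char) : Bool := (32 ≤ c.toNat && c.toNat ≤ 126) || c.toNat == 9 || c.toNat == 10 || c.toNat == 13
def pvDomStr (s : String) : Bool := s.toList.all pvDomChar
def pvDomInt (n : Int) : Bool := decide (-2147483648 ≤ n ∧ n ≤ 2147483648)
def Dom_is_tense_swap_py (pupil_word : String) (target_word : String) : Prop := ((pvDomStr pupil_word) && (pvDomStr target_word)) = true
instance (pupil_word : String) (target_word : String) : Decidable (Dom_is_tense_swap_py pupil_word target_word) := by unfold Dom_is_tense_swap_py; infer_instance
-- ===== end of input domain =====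

-- B replaces A's longest-common-prefix scan by direct enumeration of the nine (past,pres)
-- suffix-rewrite rules (alternative decomposition, same cost).

-- ===== PORT A =====
-- the 'for a, b in zip(...): if a == b: common += 1 else: break' loop
def pvCommonLoop : List (Char × Char) → Int → Int
  | [], c => c
  | (a, b) :: rest, c => if a == b then pvCommonLoop rest (c + 1) else c

def pvPastSuffs : List String := ["d", "ed", "ied"]
def pvPresSuffs : List String := ["s", "es", "ies"]

def is_tense_swap_py (pupil_word : String) (target_word : String) : Bool :=
  if pupil_word == target_word || PySem.Str.len pupil_word < 4 || PySem.Str.len target_word < 4 then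
    false
  else
    let common := pvCommonLoop (pupil_word.toList.zip target_word.toList) 0
    if common < 3 then false
    else
      let p_suf := PySem.Str.slice pupil_word (some common) none
      let t_suf := PySem.Str.slice target_word (some common) none
      (pvPastSuffs.contains p_suf && pvPresSuffs.contains t_suf) ||
      (pvPresSuffs.contains p_suf && pvPastSuffs.contains t_suf)

-- ===== PORT B =====
def pvRules : List (String × String) :=
  [("d", "s"), ("d", "es"), ("d", "ies"),
   ("ed", "s"), ("ed", "es"), ("ed", "ies"),
   ("ied", "s"), ("ied", "es"), ("ied", "ies")]

def pvRuleHits (w1 w2 past pres : String) : Bool :=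
  PySem.Str.endswith w1 past && PySem.Str.endswith w2 pres &&
  (let stem1 := PySem.Str.slice w1 none (some (PySem.Str.len w1 - PySem.Str.len past))
   let stem2 := PySem.Str.slice w2 none (some (PySem.Str.len w2 - PySem.Str.len pres))
   decide (3 ≤ PySem.Str.len stem1) && stem1 == stem2)

def is_tense_swap_py_alt (pupil_word : String) (target_word : String) : Bool :=
  pvRules.any (fun r =>
    [(pupil_word, target_word), (target_word, pupil_word)].any
      (fun w => pvRuleHits w.1 w.2 r.1 r.2))

-- ===== PRECONDITION & SPEC =====
def Spec_is_tense_swap_py (pupil_word : String) (target_word : String) (out : Bool) : Prop := out = is_tense_swap_py_alt pupil_word target_word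
instance (pupil_word : String) (target_word : String) (out : Bool) : Decidable (Spec_is_tense_swap_py pupil_word target_word out) := by unfold Spec_is_tense_swap_py; infer_instance

-- ===== CLAIM (what is proved, stated in full; the proofs are below) =====
def Claim_equal_is_tense_swap_py : Prop := ∀ (pupil_word : String) (target_word : String), Dom_is_tense_swap_py pupil_word target_word → Spec_is_tense_swap_py pupil_word target_word (is_tense_swap_py pupil_word target_word)

-- ===== LEMMAS AND PROOFS =====

-- length of the longest common prefix
def pvLcp : List Char → List Char → Nat
  | a :: x, b :: y => if a = b then pvLcp x y + 1 else 0
  | _, _ => 0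

-- the suffix sets as char lists
def pvPastL : List (List Char) := [['d'], ['e', 'd'], ['i', 'e', 'd']]
def pvPresL : List (List Char) := [['s'], ['e', 's'], ['i', 'e', 's']]

-- pivot characterization: both words split as a common stem (length ≥ 3) plus a past/pres suffix pair
def pvDecomp (P T : String) : Prop :=
  ∃ s p q : List Char, P.toList = s ++ p ∧ T.toList = s ++ q ∧ 3 ≤ s.length ∧
    ((p ∈ pvPastL ∧ q ∈ pvPresL) ∨ (p ∈ pvPresL ∧ q ∈ pvPastL))

theorem pvCommonLoop_eq (P T : List Char) (c : Int) :
    pvCommonLoop (P.zip T) c = c + (pvLcp P T : Int) := by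
  induction P generalizing T c with
  | nil => simp [pvCommonLoop, pvLcp]
  | cons a x ih =>
    cases T with
    | nil => simp [pvCommonLoop, pvLcp]
    | cons b y =>
      by_cases h : a = b <;> simp [pvCommonLoop, pvLcp, h, ih]
      omega

theorem pvLcp_le_left (P T : List Char) : pvLcp P T ≤ P.length := by
  induction P generalizing T with
  | nil => simp [pvLcp]
  | cons a x ih =>
    cases T with
    | nil => simp [pvLcp]
    | cons b y =>
      by_cases h : a = b <;> simp [pvLcp, h]
      exact ih y

theorem pvLcp_take_eq (P T : List Char) :
    P.take (pvLcp P T) = T.take (pvLcp P T) := by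
  induction P generalizing T with
  | nil => simp [pvLcp]
  | cons a x ih =>
    cases T with
    | nil => simp [pvLcp]
    | cons b y =>
      by_cases h : a = b <;> simp [pvLcp, h]
      exact ih y

theorem pvLcp_append (c p q : List Char) :
    pvLcp (c ++ p) (c ++ q) = c.length + pvLcp p q := by
  induction c with
  | nil => simp
  | cons a x ih => simp [pvLcp, ih]; omega

theorem pvStrEq_iff_toList (s t : String) : s = t ↔ s.toList = t.toList := by
  constructor
  · intro h; rw [h]
  · exact String.toList_inj.mp

theorem pvStrLen (w : String) : PySem.Str.len w = (w.toList.length : Int) := by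
  simp [PySem.Str.len]

-- contains over the string suffix sets vs char-list membership
theorem pvContains_past (w : String) :
    pvPastSuffs.contains w = true ↔ w.toList ∈ pvPastL := by
  simp only [pvPastSuffs, pvPastL, List.contains_eq_mem, List.mem_cons, List.not_mem_nil,
    or_false, decide_eq_true_eq, pvStrEq_iff_toList]
  exact Iff.rfl

theorem pvContains_pres (w : String) :
    pvPresSuffs.contains w = true ↔ w.toList ∈ pvPresL := by
  simp only [pvPresSuffs, pvPresL, List.contains_eq_mem, List.mem_cons, List.not_mem_nil,
    or_false, decide_eq_true_eq, pvStrEq_iff_toList]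
  exact Iff.rfl

-- the stem slice w[:len(w)-len(suf)] computes the stem when suf is a suffix
theorem pvStemSlice (w suf : String) (s : List Char) (h : w.toList = s ++ suf.toList) :
    (PySem.Str.slice w none (some (PySem.Str.len w - PySem.Str.len suf))).toList = s := by
  have hb : PySem.Str.len w - PySem.Str.len suf = (s.length : Int) := by
    rw [pvStrLen, pvStrLen, h]; simp
  rw [hb]
  simp [PySem.Str.toList_slice, PySem.List.slice_to_natCast, h]

-- pvRuleHits holds iff both words are the same stem (length ≥ 3) + the given suffixes
theorem pvRuleHits_iff (w1 w2 past pres : String) :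
    pvRuleHits w1 w2 past pres = true ↔
      ∃ s : List Char, w1.toList = s ++ past.toList ∧ w2.toList = s ++ pres.toList ∧ 3 ≤ s.length := by
  constructor
  · intro h
    simp only [pvRuleHits, Bool.and_eq_true] at h
    obtain ⟨⟨h1, h2⟩, h3, h4⟩ := h
    rw [PySem.Str.endswith_eq, PySem.Chars.endswith_iff] at h1 h2
    obtain ⟨s1, hs1⟩ := h1
    obtain ⟨s2, hs2⟩ := h2
    have e1 := pvStemSlice w1 past s1 hs1.symm
    have e2 := pvStemSlice w2 pres s2 hs2.symm
    have hlen : 3 ≤ s1.length := by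
      simp only [decide_eq_true_eq] at h3
      have hx := pvStrLen (PySem.Str.slice w1 none (some (PySem.Str.len w1 - PySem.Str.len past)))
      rw [e1] at hx
      rw [hx] at h3
      exact_mod_cast h3
    have heq : s1 = s2 := by
      have h4' := beq_iff_eq.mp h4
      rw [pvStrEq_iff_toList, e1, e2] at h4'
      exact h4'
    exact ⟨s1, hs1.symm, by rw [heq]; exact hs2.symm, hlen⟩
  · rintro ⟨s, h1, h2, hs⟩
    have e1 := pvStemSlice w1 past s h1
    have e2 := pvStemSlice w2 pres s h2
    simp only [pvRuleHits, Bool.and_eq_true]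
    refine ⟨⟨?_, ?_⟩, ?_, ?_⟩
    · rw [PySem.Str.endswith_eq, PySem.Chars.endswith_iff]; exact ⟨s, h1.symm⟩
    · rw [PySem.Str.endswith_eq, PySem.Chars.endswith_iff]; exact ⟨s, h2.symm⟩
    · simp only [decide_eq_true_eq]
      have hx := pvStrLen (PySem.Str.slice w1 none (some (PySem.Str.len w1 - PySem.Str.len past)))
      rw [e1] at hx
      rw [hx]
      exact_mod_cast hs
    · rw [beq_iff_eq, pvStrEq_iff_toList, e1, e2]

-- picking one rule in one order makes B return true
theorem pvAlt_of_rule (P T past pres : String) (hr : (past, pres) ∈ pvRules) (s : List Char)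
    (h1 : P.toList = s ++ past.toList) (h2 : T.toList = s ++ pres.toList) (hs : 3 ≤ s.length) :
    is_tense_swap_py_alt P T = true := by
  simp only [is_tense_swap_py_alt, List.any_eq_true]
  exact ⟨(past, pres), hr, (P, T), by simp, (pvRuleHits_iff P T past pres).mpr ⟨s, h1, h2, hs⟩⟩

theorem pvAlt_of_rule_rev (P T past pres : String) (hr : (past, pres) ∈ pvRules) (s : List Char)
    (h1 : T.toList = s ++ past.toList) (h2 : P.toList = s ++ pres.toList) (hs : 3 ≤ s.length) :
    is_tense_swap_py_alt P T = true := by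
  simp only [is_tense_swap_py_alt, List.any_eq_true]
  exact ⟨(past, pres), hr, (T, P), by simp, (pvRuleHits_iff T P past pres).mpr ⟨s, h1, h2, hs⟩⟩

-- B computes the pivot characterization
theorem pvAlt_iff (P T : String) : is_tense_swap_py_alt P T = true ↔ pvDecomp P T := by
  constructor
  · intro h
    simp only [is_tense_swap_py_alt, List.any_eq_true] at h
    obtain ⟨r, hr, w, hw, hhit⟩ := h
    simp only [pvRules, List.mem_cons, List.not_mem_nil, or_false] at hr
    simp only [List.mem_cons, List.not_mem_nil, or_false] at hw
    rw [pvRuleHits_iff] at hhit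
    obtain ⟨s, h1, h2, hs⟩ := hhit
    rcases hr with rfl | rfl | rfl | rfl | rfl | rfl | rfl | rfl | rfl <;>
      rcases hw with rfl | rfl <;>
      first
      | exact ⟨s, _, _, h1, h2, hs, Or.inl ⟨by decide, by decide⟩⟩
      | exact ⟨s, _, _, h2, h1, hs, Or.inr ⟨by decide, by decide⟩⟩
  · rintro ⟨s, p, q, h1, h2, hs, hmem⟩
    rcases hmem with ⟨hp, hq⟩ | ⟨hp, hq⟩ <;>
      simp only [pvPastL, pvPresL, List.mem_cons, List.not_mem_nil, or_false] at hp hq <;>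
      rcases hp with rfl | rfl | rfl <;> rcases hq with rfl | rfl | rfl <;>
      first
      | exact pvAlt_of_rule P T "d" "s" (by decide) s h1 h2 hs
      | exact pvAlt_of_rule P T "d" "es" (by decide) s h1 h2 hs
      | exact pvAlt_of_rule P T "d" "ies" (by decide) s h1 h2 hs
      | exact pvAlt_of_rule P T "ed" "s" (by decide) s h1 h2 hs
      | exact pvAlt_of_rule P T "ed" "es" (by decide) s h1 h2 hs
      | exact pvAlt_of_rule P T "ed" "ies" (by decide) s h1 h2 hs
      | exact pvAlt_of_rule P T "ied" "s" (by decide) s h1 h2 hs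
      | exact pvAlt_of_rule P T "ied" "es" (by decide) s h1 h2 hs
      | exact pvAlt_of_rule P T "ied" "ies" (by decide) s h1 h2 hs
      | exact pvAlt_of_rule_rev P T "d" "s" (by decide) s h2 h1 hs
      | exact pvAlt_of_rule_rev P T "d" "es" (by decide) s h2 h1 hs
      | exact pvAlt_of_rule_rev P T "d" "ies" (by decide) s h2 h1 hs
      | exact pvAlt_of_rule_rev P T "ed" "s" (by decide) s h2 h1 hs
      | exact pvAlt_of_rule_rev P T "ed" "es" (by decide) s h2 h1 hs
      | exact pvAlt_of_rule_rev P T "ed" "ies" (by decide) s h2 h1 hs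
      | exact pvAlt_of_rule_rev P T "ied" "s" (by decide) s h2 h1 hs
      | exact pvAlt_of_rule_rev P T "ied" "es" (by decide) s h2 h1 hs
      | exact pvAlt_of_rule_rev P T "ied" "ies" (by decide) s h2 h1 hs
    
-- A returns true on any input admitting a decomposition (the divergence suffixes stay in the sets)
theorem pvA_true_core (P T : String) (s p q : List Char)
    (hP : P.toList = s ++ p) (hT : T.toList = s ++ q) (hs : 3 ≤ s.length)
    (hp1 : p ≠ []) (hq1 : q ≠ []) (hne : p ≠ q)
    (hmem : (pvPastSuffs.contains (String.ofList (p.drop (pvLcp p q))) = true ∧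
             pvPresSuffs.contains (String.ofList (q.drop (pvLcp p q))) = true) ∨
            (pvPresSuffs.contains (String.ofList (p.drop (pvLcp p q))) = true ∧
             pvPastSuffs.contains (String.ofList (q.drop (pvLcp p q))) = true)) :
    is_tense_swap_py P T = true := by
  have hPT : P ≠ T := by
    intro h
    apply hne
    have hh := congrArg String.toList h
    rw [hP, hT] at hh
    exact List.append_cancel_left hh
  have hlcp : pvLcp P.toList T.toList = s.length + pvLcp p q := by
    rw [hP, hT, pvLcp_append]
  simp only [is_tense_swap_py]
  rw [if_neg, pvCommonLoop_eq, zero_add, if_neg]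
  · have hps : PySem.Str.slice P (some ((pvLcp P.toList T.toList : Int))) none =
        String.ofList (p.drop (pvLcp p q)) := by
      rw [pvStrEq_iff_toList]
      simp only [PySem.Str.toList_slice, PySem.Chars.slice_eq_listSlice,
        PySem.List.slice_from_natCast, String.toList_ofList]
      rw [hlcp, hP, List.drop_length_add_append]
    have hts : PySem.Str.slice T (some ((pvLcp P.toList T.toList : Int))) none =
        String.ofList (q.drop (pvLcp p q)) := by
      rw [pvStrEq_iff_toList]
      simp only [PySem.Str.toList_slice, PySem.Chars.slice_eq_listSlice,
        PySem.List.slice_from_natCast, String.toList_ofList]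
      rw [hlcp, hT, List.drop_length_add_append]
    rw [hps, hts]
    simp only [Bool.or_eq_true, Bool.and_eq_true]
    rcases hmem with ⟨hm1, hm2⟩ | ⟨hm1, hm2⟩
    · exact Or.inl ⟨hm1, hm2⟩
    · exact Or.inr ⟨hm1, hm2⟩
  · rw [hlcp]
    simp only [not_lt]
    exact_mod_cast by omega
  · simp only [Bool.or_eq_true, not_or, beq_iff_eq, decide_eq_true_eq, not_lt]
    have hlp : 1 ≤ p.length := List.length_pos_iff.mpr hp1
    have hlq : 1 ≤ q.length := List.length_pos_iff.mpr hq1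
    refine ⟨⟨hPT, ?_⟩, ?_⟩
    · rw [pvStrLen, hP]; simp; omega
    · rw [pvStrLen, hT]; simp; omega

-- A computes the pivot characterization too
theorem pvA_iff (P T : String) : is_tense_swap_py P T = true ↔ pvDecomp P T := by
  constructor
  · intro h
    simp only [is_tense_swap_py] at h
    split_ifs at h with h1 h2
    rw [pvCommonLoop_eq, zero_add] at h2 h
    simp only [not_lt] at h2
    set n := pvLcp P.toList T.toList with hn
    have hnP : n ≤ P.toList.length := pvLcp_le_left _ _
    have h3n : 3 ≤ n := by exact_mod_cast h2
    have hps : (PySem.Str.slice P (some (n : Int)) none).toList = P.toList.drop n := by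
      simp [PySem.Str.toList_slice, PySem.List.slice_from_natCast]
    have hts : (PySem.Str.slice T (some (n : Int)) none).toList = T.toList.drop n := by
      simp [PySem.Str.toList_slice, PySem.List.slice_from_natCast]
    refine ⟨P.toList.take n, P.toList.drop n, T.toList.drop n,
      (List.take_append_drop n P.toList).symm, ?_, ?_, ?_⟩
    · rw [hn, pvLcp_take_eq]
      exact (List.take_append_drop n T.toList).symm
    · simp only [List.length_take]; omega
    · simp only [Bool.or_eq_true, Bool.and_eq_true] at h
      rcases h with ⟨ha, hb⟩ | ⟨ha, hb⟩
      · refine Or.inl ⟨?_, ?_⟩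
        · rw [← hps]; exact (pvContains_past _).mp ha
        · rw [← hts]; exact (pvContains_pres _).mp hb
      · refine Or.inr ⟨?_, ?_⟩
        · rw [← hps]; exact (pvContains_pres _).mp ha
        · rw [← hts]; exact (pvContains_past _).mp hb
  · rintro ⟨s, p, q, h1, h2, hs, hmem⟩
    refine pvA_true_core P T s p q h1 h2 hs ?_ ?_ ?_ ?_
    all_goals
      rcases hmem with ⟨hp, hq⟩ | ⟨hp, hq⟩ <;>
      simp only [pvPastL, pvPresL, List.mem_cons, List.not_mem_nil, or_false] at hp hq <;>
      rcases hp with rfl | rfl | rfl <;> rcases hq with rfl | rfl | rfl <;> decide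

-- ===== VERDICT (by name: the statement is the Claim_ definition above) =====
theorem is_tense_swap_py_spec : Claim_equal_is_tense_swap_py := by
  intro P T _
  unfold Spec_is_tense_swap_py
  rw [Bool.eq_iff_iff, pvA_iff, pvAlt_iff]
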